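-- pv_equiv track=rewrite | github.com/mirfan0244/pdf-paper-analyzer | chart_generator.py | year_distribution
-- ===== SOURCE A (Python) =====
-- from collections import Counter
--
-- def year_distribution(metadata_list):
--     counter = Counter()
--     for meta in metadata_list:
--         try:
--             year = int(meta.get("year", 0))
--             if year > 0:
--                 counter[year] += 1
--         except:
--             pass
--     return dict(sorted(counter.items()))
-- ===== SOURCE B (Python) =====
-- from itertools import groupby
--
-- def year_distribution(metadata_list):
--     years = []
--     for meta in metadata_list:
--         try:
--             year = int(meta.get("year", 0))
--             if year > 0:
--                 years.append(year)
--         except: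
--             pass
--     years.sort()
--     return {k: sum(1 for _ in g) for k, g in groupby(years)}
-- ===== Notes on version B (the rewrite author's own statement) =====
-- stated objective: alternative
-- what changed: B collects the valid positive years into a flat list, sorts it, and builds the distribution by walking the sorted runs with itertools.groupby, instead of hash-counting with a Counter and then sorting the distinct items.
import Mathlib
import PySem

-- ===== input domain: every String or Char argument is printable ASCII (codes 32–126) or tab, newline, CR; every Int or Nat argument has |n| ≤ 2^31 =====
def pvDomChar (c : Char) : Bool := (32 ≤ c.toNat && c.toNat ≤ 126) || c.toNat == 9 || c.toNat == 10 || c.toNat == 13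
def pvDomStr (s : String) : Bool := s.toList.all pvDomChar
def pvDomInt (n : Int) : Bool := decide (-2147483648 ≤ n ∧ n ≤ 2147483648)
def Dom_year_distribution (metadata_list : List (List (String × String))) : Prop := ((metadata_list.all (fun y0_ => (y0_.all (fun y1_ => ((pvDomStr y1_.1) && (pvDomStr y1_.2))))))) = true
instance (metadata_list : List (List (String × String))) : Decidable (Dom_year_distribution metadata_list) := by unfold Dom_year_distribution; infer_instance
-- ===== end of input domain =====

-- B builds the distribution by sort-then-groupby over the flat list of valid years
-- instead of A's Counter-then-sort-items; same exact result, alternative algorithm.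

-- ===== PORT A =====
-- for md: try year = int(md.get("year", 0)); if year > 0: counter[year] += 1; except: pass
def year_distribution (metadata_list : List (List (String × String))) : List (Int × Int) :=
  let counter : PySem.Dict Int Int :=
    metadata_list.foldl (fun d md =>
      match (PySem.Dict.mk md).get? "year" with
      | none => d            -- year = int(0) = 0, not > 0
      | some s =>
        match PySem.Int.ofStr? s with
        | none => d          -- ValueError swallowed by the bare except
        | some year => if 0 < year then d.modify year 0 (· + 1) else d)
      PySem.Dict.empty
  PySem.List.sorted2 counter.items Prod.fst Prod.snd false   -- dict(sorted(counter.items()))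

-- ===== PORT B =====
-- itertools.groupby over the sorted run list: one (key, run length) pair per run
def pvGroupRuns : List Int → List (Int × Int)
  | [] => []
  | x :: xs =>
    (x, 1 + ((xs.takeWhile (· == x)).length : Int)) :: pvGroupRuns (xs.dropWhile (· == x))
termination_by l => l.length
decreasing_by
  simp only [List.length_cons]
  exact Nat.lt_succ_of_le (List.length_dropWhile_le _ _)

def year_distribution_alt (metadata_list : List (List (String × String))) : List (Int × Int) :=
  let years : List Int :=
    metadata_list.foldl (fun acc md =>
      match (PySem.Dict.mk md).get? "year" with
      | none => acc
      | some s =>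
        match PySem.Int.ofStr? s with
        | none => acc
        | some year => if 0 < year then acc ++ [year] else acc)
      []
  pvGroupRuns (PySem.List.sorted years (fun y => y) false)

-- ===== PRECONDITION & SPEC =====
def Spec_year_distribution (metadata_list : List (List (String × String))) (out : List (Int × Int)) : Prop := out = year_distribution_alt metadata_list
instance (metadata_list : List (List (String × String))) (out : List (Int × Int)) : Decidable (Spec_year_distribution metadata_list out) := by unfold Spec_year_distribution; infer_instance

-- ===== CLAIM (what is proved, stated in full; the proofs are below) =====
def Claim_equal_year_distribution : Prop := ∀ (metadata_list : List (List (String × String))), Dom_year_distribution metadata_list → Spec_year_distribution metadata_list (year_distribution metadata_list)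

-- ===== LEMMAS AND PROOFS =====

-- the valid positive year extracted from one metadata dict, if any
def pvYearOf? (md : List (String × String)) : Option Int :=
  match (PySem.Dict.mk md).get? "year" with
  | none => none
  | some s =>
    match PySem.Int.ofStr? s with
    | none => none
    | some year => if 0 < year then some year else none

theorem pvStepA (d : PySem.Dict Int Int) (md : List (String × String)) :
    (match (PySem.Dict.mk md).get? "year" with
      | none => d
      | some s =>
        match PySem.Int.ofStr? s with
        | none => d
        | some year => if 0 < year then d.modify year 0 (· + 1) else d)
    = match pvYearOf? md with
      | none => d
      | some y => d.modify y 0 (· + 1) := by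
  unfold pvYearOf?
  cases (PySem.Dict.mk md).get? "year" with
  | none => rfl
  | some s =>
    simp only []
    cases PySem.Int.ofStr? s with
    | none => rfl
    | some y =>
      simp only []
      by_cases hy : 0 < y <;> simp [hy]

theorem pvStepB (acc : List Int) (md : List (String × String)) :
    (match (PySem.Dict.mk md).get? "year" with
      | none => acc
      | some s =>
        match PySem.Int.ofStr? s with
        | none => acc
        | some year => if 0 < year then acc ++ [year] else acc)
    = match pvYearOf? md with
      | none => acc
      | some y => acc ++ [y] := by
  unfold pvYearOf?
  cases (PySem.Dict.mk md).get? "year" with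
  | none => rfl
  | some s =>
    simp only []
    cases PySem.Int.ofStr? s with
    | none => rfl
    | some y =>
      simp only []
      by_cases hy : 0 < y <;> simp [hy]

theorem pvFoldA_eq (metadata_list : List (List (String × String))) (d : PySem.Dict Int Int) :
    metadata_list.foldl (fun d md =>
      match (PySem.Dict.mk md).get? "year" with
      | none => d
      | some s =>
        match PySem.Int.ofStr? s with
        | none => d
        | some year => if 0 < year then d.modify year 0 (· + 1) else d) d
    = (metadata_list.filterMap pvYearOf?).foldl (fun d x => d.modify x 0 (· + 1)) d := by
  induction metadata_list generalizing d with
  | nil => rfl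
  | cons m ms ih =>
    simp only [List.foldl_cons, List.filterMap_cons]
    rw [pvStepA]
    cases pvYearOf? m with
    | none => exact ih d
    | some y => simp only [List.foldl_cons]; exact ih _

theorem pvFoldB_eq (metadata_list : List (List (String × String))) (acc : List Int) :
    metadata_list.foldl (fun acc md =>
      match (PySem.Dict.mk md).get? "year" with
      | none => acc
      | some s =>
        match PySem.Int.ofStr? s with
        | none => acc
        | some year => if 0 < year then acc ++ [year] else acc) acc
    = acc ++ metadata_list.filterMap pvYearOf? := by
  induction metadata_list generalizing acc with
  | nil => simp
  | cons m ms ih =>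
    simp only [List.foldl_cons, List.filterMap_cons]
    rw [pvStepB]
    cases pvYearOf? m with
    | none => exact ih acc
    | some y => rw [ih]; simp

-- a comparator congruence for insertBy
theorem pvInsertBy_congr {α : Type} (b b' : α → α → Bool) (x : α) (ys : List α)
    (h : ∀ y ∈ ys, b x y = b' x y) :
    PySem.List.insertBy b x ys = PySem.List.insertBy b' x ys := by
  induction ys with
  | nil => rfl
  | cons y ys ih =>
    simp only [PySem.List.insertBy]
    rw [h y (by simp)]
    split
    · rfl
    · rw [ih (fun z hz => h z (by simp [hz]))]

-- on a list whose first components are pairwise distinct, Python's lexicographic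
-- tuple sort coincides with sorting by the first component
theorem pvSorted2_eq_sorted (xs : List (Int × Int))
    (hx : xs.Pairwise (fun a b => a.1 ≠ b.1)) :
    PySem.List.sorted2 xs Prod.fst Prod.snd false = PySem.List.sorted xs Prod.fst false := by
  rw [PySem.List.sorted_eq_foldl_insertBy]
  show List.foldl _ [] xs = _
  have main : ∀ (l : List (Int × Int)) (acc : List (Int × Int)),
      l.Pairwise (fun a b => a.1 ≠ b.1) →
      (∀ x ∈ l, ∀ y ∈ acc, x.1 ≠ y.1) →
      List.foldl (fun acc x => PySem.List.insertBy
          (fun a b => decide (a.1 < b.1) || !decide (b.1 < a.1) && decide (a.2 < b.2)) x acc) acc l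
      = List.foldl (fun acc x => PySem.List.insertBy (fun a b => decide (a.1 < b.1)) x acc) acc l := by
    intro l
    induction l with
    | nil => intro acc _ _; rfl
    | cons x t ih =>
      intro acc hp hd
      simp only [List.foldl_cons]
      have hcong : PySem.List.insertBy
          (fun a b => decide (a.1 < b.1) || !decide (b.1 < a.1) && decide (a.2 < b.2)) x acc
          = PySem.List.insertBy (fun a b => decide (a.1 < b.1)) x acc := by
        apply pvInsertBy_congr
        intro y hy
        have hne : x.1 ≠ y.1 := hd x (by simp) y hy
        rcases lt_or_gt_of_ne hne with h | h
        · simp [h, not_lt.mpr (le_of_lt h)]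
        · simp [not_lt.mpr (le_of_lt h), h]
      rw [hcong]
      refine ih _ (List.Pairwise.of_cons hp) ?_
      intro z hz y hy
      rw [PySem.List.insertBy_mem_iff] at hy
      rcases hy with rfl | hy
      · exact ((List.pairwise_cons.mp hp).1 z hz).symm
      · exact hd z (by simp [hz]) y hy
  exact main xs [] hx (by simp)

-- every y left after dropping the leading run of x's is strictly greater than x
theorem pvDropWhile_gt (x : Int) (xs : List Int) (h : (x :: xs).Pairwise (· ≤ ·)) :
    ∀ y ∈ xs.dropWhile (· == x), x < y := by
  induction xs with
  | nil => simp
  | cons a t ih =>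
    intro y hy
    by_cases ha : a = x
    · subst ha
      rw [List.dropWhile_cons_of_pos (by simp)] at hy
      have h' : (a :: t).Pairwise (· ≤ ·) := by
        have := List.pairwise_cons.mp h
        exact List.pairwise_cons.mpr ⟨fun z hz => (List.pairwise_cons.mp this.2).1 z hz |>.trans (le_refl z), (List.pairwise_cons.mp this.2).2⟩
      exact ih (by
        have h2 := List.pairwise_cons.mp h
        exact List.pairwise_cons.mpr ⟨fun z hz => h2.1 z (by simp [hz]), (List.pairwise_cons.mp h2.2).2⟩) y hy
    · rw [List.dropWhile_cons_of_neg (by simp [ha])] at hy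
      have h2 := List.pairwise_cons.mp h
      have hxa : x < a := lt_of_le_of_ne (h2.1 a (by simp)) (Ne.symm ha)
      rcases List.mem_cons.mp hy with rfl | hyt
      · exact hxa
      · exact hxa.trans_le ((List.pairwise_cons.mp h2.2).1 y hyt)

-- count of x in a sorted list x :: xs is 1 plus the length of the leading run
theorem pvCount_head (x : Int) (xs : List Int) (h : (x :: xs).Pairwise (· ≤ ·)) :
    List.count x (x :: xs) = 1 + (xs.takeWhile (· == x)).length := by
  have hsplit : xs.takeWhile (· == x) ++ xs.dropWhile (· == x) = xs :=
    List.takeWhile_append_dropWhile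
  have hc1 : List.count x (xs.takeWhile (· == x)) = (xs.takeWhile (· == x)).length := by
    apply List.count_eq_length.mpr
    intro b hb
    have := List.mem_takeWhile_imp hb
    simp at this
    exact this.symm
  have hc2 : List.count x (xs.dropWhile (· == x)) = 0 := by
    apply List.count_eq_zero.mpr
    intro hb
    exact lt_irrefl x (pvDropWhile_gt x xs h x hb)
  calc List.count x (x :: xs) = 1 + List.count x xs := by simp; omega
    _ = 1 + (List.count x (xs.takeWhile (· == x)) + List.count x (xs.dropWhile (· == x))) := by
          conv_lhs => rw [← hsplit]
          rw [List.count_append]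
    _ = 1 + (xs.takeWhile (· == x)).length := by rw [hc1, hc2]; omega

-- for a key strictly above the head, counting skips the whole leading run
theorem pvCount_tail (x k : Int) (xs : List Int) (hk : x < k) :
    List.count k (x :: xs) = List.count k (xs.dropWhile (· == x)) := by
  have hsplit : xs.takeWhile (· == x) ++ xs.dropWhile (· == x) = xs :=
    List.takeWhile_append_dropWhile
  have hc0 : List.count k (xs.takeWhile (· == x)) = 0 := by
    apply List.count_eq_zero.mpr
    intro hb
    have := List.mem_takeWhile_imp hb
    simp at this
    omega
  calc List.count k (x :: xs) = List.count k xs :=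
        List.count_cons_of_ne (by omega : x ≠ k)
    _ = List.count k (xs.takeWhile (· == x)) + List.count k (xs.dropWhile (· == x)) := by
        conv_lhs => rw [← hsplit]
        rw [List.count_append]
    _ = _ := by rw [hc0]; omega

-- the tail after the leading run is still sorted
theorem pvDropWhile_pairwise (x : Int) (xs : List Int) (h : (x :: xs).Pairwise (· ≤ ·)) :
    ((xs.dropWhile (· == x)) : List Int).Pairwise (· ≤ ·) :=
  List.Pairwise.sublist ((List.dropWhile_sublist _).trans (List.sublist_cons_self x xs)) h

-- membership in pvGroupRuns of a sorted list: exactly the (value, multiplicity) pairs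
theorem pvGroupRuns_mem (s : List Int) (hs : s.Pairwise (· ≤ ·)) (k c : Int) :
    (k, c) ∈ pvGroupRuns s ↔ k ∈ s ∧ c = (List.count k s : Int) := by
  induction s using pvGroupRuns.induct with
  | case1 => simp [pvGroupRuns]
  | case2 x xs ih =>
    have hrest : ((xs.dropWhile (· == x)) : List Int).Pairwise (· ≤ ·) :=
      pvDropWhile_pairwise x xs hs
    have ih' := ih hrest
    rw [pvGroupRuns]
    constructor
    · intro hmem
      rcases List.mem_cons.mp hmem with heq | hmem'
      · have hk : k = x := congrArg Prod.fst heq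
        have hc : c = 1 + ((xs.takeWhile (· == x)).length : Int) := congrArg Prod.snd heq
        subst hk
        refine ⟨List.mem_cons_self, ?_⟩
        rw [pvCount_head k xs hs] at *
        push_cast
        omega
      · obtain ⟨hk, hc⟩ := ih'.mp hmem'
        have hlt : x < k := pvDropWhile_gt x xs hs k hk
        have hk' : k ∈ xs := (List.dropWhile_sublist _).subset hk
        refine ⟨List.mem_cons_of_mem x hk', ?_⟩
        rw [pvCount_tail x k xs hlt]
        exact hc
    · rintro ⟨hk, hc⟩
      by_cases hkx : k = x
      · subst hkx
        have := pvCount_head k xs hs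
        rw [this] at hc
        push_cast at hc
        exact List.mem_cons.mpr (Or.inl (by rw [Prod.mk.injEq]; exact ⟨rfl, hc⟩))
      · apply List.mem_cons_of_mem
        have hkxs : k ∈ xs := by
          rcases List.mem_cons.mp hk with h | h
          · exact absurd h hkx
          · exact h
        have hkrest : k ∈ xs.dropWhile (· == x) := by
          have hsplit : xs.takeWhile (· == x) ++ xs.dropWhile (· == x) = xs :=
            List.takeWhile_append_dropWhile
          rw [← hsplit] at hkxs
          rcases List.mem_append.mp hkxs with h | h
          · exact absurd (by simpa using List.mem_takeWhile_imp h) hkx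
          · exact h
        have hlt : x < k := pvDropWhile_gt x xs hs k hkrest
        apply ih'.mpr
        refine ⟨hkrest, ?_⟩
        rw [pvCount_tail x k xs hlt] at hc
        exact hc

-- the keys of pvGroupRuns of a sorted list are strictly increasing
theorem pvGroupRuns_pairwise (s : List Int) (hs : s.Pairwise (· ≤ ·)) :
    (pvGroupRuns s).Pairwise (fun a b => a.1 < b.1) := by
  induction s using pvGroupRuns.induct with
  | case1 => simp [pvGroupRuns]
  | case2 x xs ih =>
    have hrest : ((xs.dropWhile (· == x)) : List Int).Pairwise (· ≤ ·) :=
      pvDropWhile_pairwise x xs hs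
    rw [pvGroupRuns]
    refine List.pairwise_cons.mpr ⟨?_, ih hrest⟩
    rintro ⟨k, c⟩ hmem
    have := (pvGroupRuns_mem _ hrest k c).mp hmem
    exact pvDropWhile_gt x xs hs k this.1

-- ===== VERDICT (by name: the statement is the Claim_ definition above) =====
theorem year_distribution_spec : Claim_equal_year_distribution := by
  intro ml _
  unfold Spec_year_distribution year_distribution year_distribution_alt
  rw [pvFoldA_eq, pvFoldB_eq]
  simp only [List.nil_append]
  set ys := ml.filterMap pvYearOf? with hys
  rw [← PySem.Dict.counter_eq_foldl]
  rw [PySem.Dict.items_counter]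
  set f : Int → Int × Int := fun k => (k, (List.count k ys : Int)) with hf
  have hfinj : Function.Injective f := by
    intro a b hab
    exact congrArg Prod.fst hab
  have hpw_ne : ((PySem.Set.ofList ys).map f).Pairwise (fun a b => a.1 ≠ b.1) := by
    rw [List.pairwise_map]
    exact (PySem.Set.nodup_ofList ys)
  rw [pvSorted2_eq_sorted _ hpw_ne]
  have hsorted_pw : (PySem.List.sorted ys (fun y => y) false).Pairwise (· ≤ ·) :=
    PySem.List.sorted_pairwise ys (fun y => y)
  apply PySem.List.sorted_eq_of_perm_of_pairwise_lt
  · -- permutation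
    have hnod1 : (pvGroupRuns (PySem.List.sorted ys (fun y => y) false)).Nodup :=
      (pvGroupRuns_pairwise _ hsorted_pw).imp (fun h => by
        intro he; rw [he] at h; exact lt_irrefl _ h)
    have hnod2 : ((PySem.Set.ofList ys).map f).Nodup :=
      (PySem.Set.nodup_ofList ys).map hfinj
    rw [List.perm_ext_iff_of_nodup hnod1 hnod2]
    rintro ⟨k, c⟩
    rw [pvGroupRuns_mem _ hsorted_pw k c]
    have hcnt : List.count k (PySem.List.sorted ys (fun y => y) false) = List.count k ys :=
      (PySem.List.sorted_perm ys (fun y => y) false).count_eq k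
    rw [hcnt, PySem.List.mem_sorted]
    constructor
    · rintro ⟨hk, rfl⟩
      exact List.mem_map.mpr ⟨k, (PySem.Set.mem_ofList ys k).mpr hk, rfl⟩
    · intro h
      obtain ⟨k', hk', he⟩ := List.mem_map.mp h
      have hk1 : k' = k := congrArg Prod.fst he
      subst hk1
      exact ⟨(PySem.Set.mem_ofList ys k').mp hk', (congrArg Prod.snd he).symm⟩
  · exact pvGroupRuns_pairwise _ hsorted_pw
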